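-- pv_equiv track=rewrite | github.com/borgdev/anant | anant/distributed/graph_specific_ops.py | _get_enterprise_category
-- ===== SOURCE A (Python) =====
-- def _get_enterprise_category(entity_id: str) -> str:
--     """Categorize entity by enterprise domain"""
--     entity_str = str(entity_id).lower()
--     if any(term in entity_str for term in ["policy", "compliance", "audit"]):
--         return "governance"
--     elif any(term in entity_str for term in ["process", "workflow", "operation"]):
--         return "operations"
--     elif any(term in entity_str for term in ["employee", "staff", "team"]):
--         return "people"
--     elif any(term in entity_str for term in ["system", "software", "platform"]):
--         return "technology"
--     else:
--         return "general"
-- ===== SOURCE B (Python) =====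
-- # Single left-to-right scan: at each position try to match every keyword at that
-- # offset and keep the minimum priority matched; index the category list by it.
-- _KEYWORD_PRIORITY = {
--     "policy": 0, "compliance": 0, "audit": 0,
--     "process": 1, "workflow": 1, "operation": 1,
--     "employee": 2, "staff": 2, "team": 2,
--     "system": 3, "software": 3, "platform": 3,
-- }
-- _CATEGORIES = ["governance", "operations", "people", "technology", "general"]
--
--
-- def _get_enterprise_category(entity_id: str) -> str:
--     s = str(entity_id).lower()
--     best = 4
--     for i in range(len(s)):
--         for kw, pri in _KEYWORD_PRIORITY.items():
--             if pri < best and s.startswith(kw, i):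
--                 best = pri
--     return _CATEGORIES[best]
-- ===== Notes on version B (the rewrite author's own statement) =====
-- stated objective: alternative
-- what changed: Replaces the ordered if/elif cascade of per-category substring-membership tests by a single positional scan of the string that matches every keyword at each offset and maintains a running minimum priority, finally indexing a category array by that minimum.
import Mathlib
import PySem

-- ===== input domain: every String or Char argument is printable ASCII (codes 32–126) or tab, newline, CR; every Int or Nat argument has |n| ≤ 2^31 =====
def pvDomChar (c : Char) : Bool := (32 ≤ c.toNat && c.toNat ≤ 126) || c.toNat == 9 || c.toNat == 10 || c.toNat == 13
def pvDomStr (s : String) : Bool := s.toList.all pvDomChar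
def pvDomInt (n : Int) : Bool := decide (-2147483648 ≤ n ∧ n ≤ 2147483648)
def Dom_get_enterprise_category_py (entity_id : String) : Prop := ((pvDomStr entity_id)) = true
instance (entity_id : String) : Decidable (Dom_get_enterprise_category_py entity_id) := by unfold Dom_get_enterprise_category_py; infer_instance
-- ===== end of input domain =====

-- B replaces the if/elif cascade of substring tests by one positional scan of the
-- string keeping the minimum matched keyword priority (objective: alternative, same cost).

-- ===== PORT A =====
def get_enterprise_category_py (entity_id : String) : String :=
  let entity_str := PySem.Str.lower entity_id
  if ["policy", "compliance", "audit"].any (fun term => PySem.Str.isIn term entity_str) then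
    "governance"
  else if ["process", "workflow", "operation"].any (fun term => PySem.Str.isIn term entity_str) then
    "operations"
  else if ["employee", "staff", "team"].any (fun term => PySem.Str.isIn term entity_str) then
    "people"
  else if ["system", "software", "platform"].any (fun term => PySem.Str.isIn term entity_str) then
    "technology"
  else
    "general"

-- ===== PORT B =====
-- keyword -> priority table, in Source B's dict insertion order
def pvKW : List (List Char × Nat) :=
  [("policy".toList, 0), ("compliance".toList, 0), ("audit".toList, 0),
   ("process".toList, 1), ("workflow".toList, 1), ("operation".toList, 1),
   ("employee".toList, 2), ("staff".toList, 2), ("team".toList, 2),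
   ("system".toList, 3), ("software".toList, 3), ("platform".toList, 3)]

def pvCategories : List String := ["governance", "operations", "people", "technology", "general"]

-- one inner-loop step: `if pri < best and s.startswith(kw, i): best = pri`
-- (s.startswith(kw, i) with 0 ≤ i is exactly kw being a prefix of s dropped by i)
def pvStep (suffix : List Char) (b : Nat) (kp : List Char × Nat) : Nat :=
  if kp.2 < b ∧ kp.1.isPrefixOf suffix then kp.2 else b

def get_enterprise_category_py_alt (entity_id : String) : String :=
  let s := (PySem.Str.lower entity_id).toList
  let best := (List.range s.length).foldl (fun best i => pvKW.foldl (pvStep (s.drop i)) best) 4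
  -- _CATEGORIES[best]: best is always ≤ 4, so plain indexing never raises; getD is exact here
  pvCategories.getD best "general"

-- ===== PRECONDITION & SPEC =====
def Spec_get_enterprise_category_py (entity_id : String) (out : String) : Prop := out = get_enterprise_category_py_alt entity_id
instance (entity_id : String) (out : String) : Decidable (Spec_get_enterprise_category_py entity_id out) := by unfold Spec_get_enterprise_category_py; infer_instance

-- ===== CLAIM (what is proved, stated in full; the proofs are below) =====
def Claim_equal_get_enterprise_category_py : Prop := ∀ (entity_id : String), Dom_get_enterprise_category_py entity_id → Spec_get_enterprise_category_py entity_id (get_enterprise_category_py entity_id)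

-- ===== LEMMAS AND PROOFS =====

-- one step of the inner fold is a conditional `min`
theorem pvStep_eq (suffix : List Char) (b : Nat) (kp : List Char × Nat) :
    pvStep suffix b kp = if kp.1.isPrefixOf suffix then min b kp.2 else b := by
  unfold pvStep
  by_cases hp : kp.1.isPrefixOf suffix <;> by_cases hl : kp.2 < b <;>
    simp [hp, hl] <;> omega

-- the inner fold is a `min`-fold over the priorities of keywords matching here
theorem pvInner_eq (suffix : List Char) :
    ∀ (kws : List (List Char × Nat)) (b : Nat),
      kws.foldl (pvStep suffix) b
        = List.foldl min b ((kws.filter (fun kp => kp.1.isPrefixOf suffix)).map Prod.snd) := by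
  intro kws
  induction kws with
  | nil => intro b; rfl
  | cons kp rest ih =>
    intro b
    by_cases hp : kp.1.isPrefixOf suffix <;>
      simp [List.foldl_cons, pvStep_eq, hp, ih]

theorem pvFoldMin_flat (p : Nat → List Nat) :
    ∀ (L : List Nat) (a : Nat),
      L.foldl (fun b i => List.foldl min b (p i)) a = List.foldl min a (L.flatMap p) := by
  intro L
  induction L with
  | nil => intro a; rfl
  | cons x xs ih => intro a; simp [List.foldl_cons, List.flatMap_cons, List.foldl_append, ih]

theorem pvFoldMin_le_init : ∀ (L : List Nat) (a : Nat), List.foldl min a L ≤ a := by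
  intro L
  induction L with
  | nil => intro a; simp
  | cons x xs ih => intro a; exact le_trans (ih (min a x)) (min_le_left a x)

theorem pvFoldMin_le_mem : ∀ (L : List Nat) (a x : Nat), x ∈ L → List.foldl min a L ≤ x := by
  intro L
  induction L with
  | nil => intro a x hx; simp at hx
  | cons y ys ih =>
    intro a x hx
    rcases List.mem_cons.mp hx with h | h
    · subst h; exact le_trans (pvFoldMin_le_init ys (min a x)) (min_le_right a x)
    · exact ih (min a y) x h

theorem pvFoldMin_cases : ∀ (L : List Nat) (a : Nat), List.foldl min a L = a ∨ List.foldl min a L ∈ L := by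
  intro L
  induction L with
  | nil => intro a; left; rfl
  | cons x xs ih =>
    intro a
    rcases ih (min a x) with h | h
    · rcases Nat.le_total a x with hax | hax
      · left; rw [List.foldl_cons, h, min_eq_left hax]
      · right; rw [List.foldl_cons, h, min_eq_right hax]; exact List.mem_cons_self
    · right; exact List.mem_cons_of_mem x h

-- the multiset of priorities matched anywhere in s
def pvMatched (s : List Char) : List Nat :=
  (List.range s.length).flatMap
    (fun i => ((pvKW.filter (fun kp => kp.1.isPrefixOf (s.drop i))).map Prod.snd))

theorem pvMem_matched_iff (s : List Char) (k : Nat) :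
    k ∈ pvMatched s ↔ ∃ kp ∈ pvKW, kp.2 = k ∧ ∃ i < s.length, kp.1.isPrefixOf (s.drop i) := by
  unfold pvMatched
  simp only [List.mem_flatMap, List.mem_range, List.mem_map, List.mem_filter]
  constructor
  · rintro ⟨i, hi, kp, ⟨hkp, hpre⟩, hk⟩
    exact ⟨kp, hkp, hk, i, hi, hpre⟩
  · rintro ⟨kp, hkp, hk, i, hi, hpre⟩
    exact ⟨i, hi, kp, ⟨hkp, hpre⟩, hk⟩

-- bounded positional match ↔ infix, for nonempty keywords
theorem pvMatchAt_iff_infix (kw s : List Char) (hne : kw ≠ []) :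
    (∃ i < s.length, kw <+: s.drop i) ↔ kw <:+: s := by
  constructor
  · rintro ⟨i, _, hpre⟩
    exact hpre.isInfix.trans (List.drop_suffix i s).isInfix
  · intro hinf
    have h2 : PySem.Chars.isIn kw s = true := (PySem.Chars.isIn_iff_infix kw s).mpr hinf
    obtain ⟨j, hj⟩ := (PySem.Chars.exists_prefix_drop_iff_isIn kw s).mpr h2
    by_cases hjl : j < s.length
    · exact ⟨j, hjl, hj⟩
    · exfalso
      rw [List.drop_eq_nil_of_le (le_of_not_gt hjl)] at hj
      exact hne (List.prefix_nil.mp hj)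

-- any member of pvMatched s certifies its group's infix disjunction
theorem pvMem_matched_elim (s : List Char) (k : Nat) (hk : k ∈ pvMatched s) :
    (k = 0 ∧ ("policy".toList <:+: s ∨ "compliance".toList <:+: s ∨ "audit".toList <:+: s)) ∨
    (k = 1 ∧ ("process".toList <:+: s ∨ "workflow".toList <:+: s ∨ "operation".toList <:+: s)) ∨
    (k = 2 ∧ ("employee".toList <:+: s ∨ "staff".toList <:+: s ∨ "team".toList <:+: s)) ∨
    (k = 3 ∧ ("system".toList <:+: s ∨ "software".toList <:+: s ∨ "platform".toList <:+: s)) := by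
  obtain ⟨kp, hkp, hk2, hex⟩ := (pvMem_matched_iff s k).mp hk
  have hkws : kp ∈ pvKW := hkp
  simp only [List.isPrefixOf_iff_prefix] at hex
  simp only [pvKW, List.mem_cons, List.not_mem_nil, or_false] at hkws
  subst hk2
  rcases hkws with h|h|h|h|h|h|h|h|h|h|h|h <;> subst h <;>
    (have hinf := (pvMatchAt_iff_infix _ s (by decide)).mp hex)
  · exact Or.inl ⟨rfl, Or.inl hinf⟩
  · exact Or.inl ⟨rfl, Or.inr (Or.inl hinf)⟩
  · exact Or.inl ⟨rfl, Or.inr (Or.inr hinf)⟩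
  · exact Or.inr (Or.inl ⟨rfl, Or.inl hinf⟩)
  · exact Or.inr (Or.inl ⟨rfl, Or.inr (Or.inl hinf)⟩)
  · exact Or.inr (Or.inl ⟨rfl, Or.inr (Or.inr hinf)⟩)
  · exact Or.inr (Or.inr (Or.inl ⟨rfl, Or.inl hinf⟩))
  · exact Or.inr (Or.inr (Or.inl ⟨rfl, Or.inr (Or.inl hinf)⟩))
  · exact Or.inr (Or.inr (Or.inl ⟨rfl, Or.inr (Or.inr hinf)⟩))
  · exact Or.inr (Or.inr (Or.inr ⟨rfl, Or.inl hinf⟩))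
  · exact Or.inr (Or.inr (Or.inr ⟨rfl, Or.inr (Or.inl hinf)⟩))
  · exact Or.inr (Or.inr (Or.inr ⟨rfl, Or.inr (Or.inr hinf)⟩))

theorem pvMem_matched_intro (s : List Char) (kw : List Char) (k : Nat)
    (hkp : (kw, k) ∈ pvKW) (hne : kw ≠ []) (hinf : kw <:+: s) : k ∈ pvMatched s := by
  refine (pvMem_matched_iff s k).mpr ⟨(kw, k), hkp, rfl, ?_⟩
  obtain ⟨i, hi, hpre⟩ := (pvMatchAt_iff_infix kw s hne).mpr hinf
  exact ⟨i, hi, List.isPrefixOf_iff_prefix.mpr hpre⟩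

-- core: the min-fold over matched priorities realises the if/elif cascade
theorem pv_core (s : List Char) :
    pvCategories.getD (List.foldl min 4 (pvMatched s)) "general"
      = if ("policy".toList <:+: s ∨ "compliance".toList <:+: s ∨ "audit".toList <:+: s) then "governance"
        else if ("process".toList <:+: s ∨ "workflow".toList <:+: s ∨ "operation".toList <:+: s) then "operations"
        else if ("employee".toList <:+: s ∨ "staff".toList <:+: s ∨ "team".toList <:+: s) then "people"
        else if ("system".toList <:+: s ∨ "software".toList <:+: s ∨ "platform".toList <:+: s) then "technology"
        else "general" := by
  have hcases := pvFoldMin_cases (pvMatched s) 4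
  by_cases c0 : "policy".toList <:+: s ∨ "compliance".toList <:+: s ∨ "audit".toList <:+: s
  · have h0 : (0 : Nat) ∈ pvMatched s := by
      rcases c0 with h|h|h
      · exact pvMem_matched_intro s _ 0 (by decide) (by decide) h
      · exact pvMem_matched_intro s _ 0 (by decide) (by decide) h
      · exact pvMem_matched_intro s _ 0 (by decide) (by decide) h
    have hb : List.foldl min 4 (pvMatched s) = 0 :=
      Nat.le_zero.mp (pvFoldMin_le_mem _ 4 0 h0)
    rw [hb, if_pos c0]; rfl
  · by_cases c1 : "process".toList <:+: s ∨ "workflow".toList <:+: s ∨ "operation".toList <:+: s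
    · have h1 : (1 : Nat) ∈ pvMatched s := by
        rcases c1 with h|h|h
        · exact pvMem_matched_intro s _ 1 (by decide) (by decide) h
        · exact pvMem_matched_intro s _ 1 (by decide) (by decide) h
        · exact pvMem_matched_intro s _ 1 (by decide) (by decide) h
      have hle : List.foldl min 4 (pvMatched s) ≤ 1 := pvFoldMin_le_mem _ 4 1 h1
      have hmem : List.foldl min 4 (pvMatched s) ∈ pvMatched s := by
        rcases hcases with h | h
        · exfalso; omega
        · exact h
      have hb : List.foldl min 4 (pvMatched s) = 1 := by
        rcases pvMem_matched_elim s _ hmem with ⟨he, hg⟩ | ⟨he, _⟩ | ⟨he, _⟩ | ⟨he, _⟩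
        · exact absurd hg c0
        all_goals omega
      rw [hb, if_neg c0, if_pos c1]; rfl
    · by_cases c2 : "employee".toList <:+: s ∨ "staff".toList <:+: s ∨ "team".toList <:+: s
      · have h2 : (2 : Nat) ∈ pvMatched s := by
          rcases c2 with h|h|h
          · exact pvMem_matched_intro s _ 2 (by decide) (by decide) h
          · exact pvMem_matched_intro s _ 2 (by decide) (by decide) h
          · exact pvMem_matched_intro s _ 2 (by decide) (by decide) h
        have hle : List.foldl min 4 (pvMatched s) ≤ 2 := pvFoldMin_le_mem _ 4 2 h2
        have hmem : List.foldl min 4 (pvMatched s) ∈ pvMatched s := by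
          rcases hcases with h | h
          · exfalso; omega
          · exact h
        have hb : List.foldl min 4 (pvMatched s) = 2 := by
          rcases pvMem_matched_elim s _ hmem with ⟨he, hg⟩ | ⟨he, hg⟩ | ⟨he, _⟩ | ⟨he, _⟩
          · exact absurd hg c0
          · exact absurd hg c1
          · exact he
          · omega
        rw [hb, if_neg c0, if_neg c1, if_pos c2]; rfl
      · by_cases c3 : "system".toList <:+: s ∨ "software".toList <:+: s ∨ "platform".toList <:+: s
        · have h3 : (3 : Nat) ∈ pvMatched s := by
            rcases c3 with h|h|h
            · exact pvMem_matched_intro s _ 3 (by decide) (by decide) h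
            · exact pvMem_matched_intro s _ 3 (by decide) (by decide) h
            · exact pvMem_matched_intro s _ 3 (by decide) (by decide) h
          have hle : List.foldl min 4 (pvMatched s) ≤ 3 := pvFoldMin_le_mem _ 4 3 h3
          have hmem : List.foldl min 4 (pvMatched s) ∈ pvMatched s := by
            rcases hcases with h | h
            · exfalso; omega
            · exact h
          have hb : List.foldl min 4 (pvMatched s) = 3 := by
            rcases pvMem_matched_elim s _ hmem with ⟨_, hg⟩ | ⟨_, hg⟩ | ⟨_, hg⟩ | ⟨he, _⟩
            · exact absurd hg c0
            · exact absurd hg c1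
            · exact absurd hg c2
            · exact he
          rw [hb, if_neg c0, if_neg c1, if_neg c2, if_pos c3]; rfl
        · have hb : List.foldl min 4 (pvMatched s) = 4 := by
            rcases hcases with h | h
            · exact h
            · exfalso
              rcases pvMem_matched_elim s _ h with ⟨_, hg⟩ | ⟨_, hg⟩ | ⟨_, hg⟩ | ⟨_, hg⟩
              · exact c0 hg
              · exact c1 hg
              · exact c2 hg
              · exact c3 hg
          rw [hb, if_neg c0, if_neg c1, if_neg c2, if_neg c3]; rfl

-- the two ports agree
theorem pv_main (entity_id : String) :
    get_enterprise_category_py entity_id = get_enterprise_category_py_alt entity_id := by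
  have hA : get_enterprise_category_py entity_id
      = if ("policy".toList <:+: (PySem.Str.lower entity_id).toList ∨
            "compliance".toList <:+: (PySem.Str.lower entity_id).toList ∨
            "audit".toList <:+: (PySem.Str.lower entity_id).toList) then "governance"
        else if ("process".toList <:+: (PySem.Str.lower entity_id).toList ∨
            "workflow".toList <:+: (PySem.Str.lower entity_id).toList ∨
            "operation".toList <:+: (PySem.Str.lower entity_id).toList) then "operations"
        else if ("employee".toList <:+: (PySem.Str.lower entity_id).toList ∨
            "staff".toList <:+: (PySem.Str.lower entity_id).toList ∨
            "team".toList <:+: (PySem.Str.lower entity_id).toList) then "people"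
        else if ("system".toList <:+: (PySem.Str.lower entity_id).toList ∨
            "software".toList <:+: (PySem.Str.lower entity_id).toList ∨
            "platform".toList <:+: (PySem.Str.lower entity_id).toList) then "technology"
        else "general" := by
    simp only [get_enterprise_category_py, List.any_cons, List.any_nil, Bool.or_false,
      Bool.or_eq_true, PySem.Str.isIn_iff_infix]
  have hB : get_enterprise_category_py_alt entity_id
      = pvCategories.getD (List.foldl min 4 (pvMatched (PySem.Str.lower entity_id).toList)) "general" := by
    simp only [get_enterprise_category_py_alt, pvInner_eq, pvFoldMin_flat, pvMatched]
  rw [hA, hB, pv_core]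

-- ===== VERDICT (by name: the statement is the Claim_ definition above) =====
theorem get_enterprise_category_py_spec : Claim_equal_get_enterprise_category_py := by
  intro entity_id _
  unfold Spec_get_enterprise_category_py
  exact pv_main entity_id
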